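-- pv_equiv track=rewrite | github.com/aakarshsingh1217/RSP | Repetition/Logic problems/Leetcode DSA course/2. Hashing/2. Checking for existence/numsCheck.py | doesExist
-- ===== SOURCE A (Python) =====
-- def doesExist(arr: list[int]) -> list[int]:
--     nums_set = set()
--     ans = set()
--
--     for num in arr:
--         nums_set.add(num)
--
--     for num in arr:
--         if num + 1 not in nums_set and num - 1 not in nums_set:
--             ans.add(num)
--
--     return ans
-- ===== SOURCE B (Python) =====
-- def doesExist(arr: list[int]) -> list[int]:
--     # Sort the distinct values; in a strictly increasing list a value has a
--     # neighbour (v-1 or v+1) present iff it takes part in an adjacent pair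
--     # (a, a+1) of consecutive sorted values.
--     s = sorted(set(arr))
--     bad = set()
--     for a, b in zip(s, s[1:]):
--         if b == a + 1:
--             bad.add(a)
--             bad.add(b)
--     ans = set()
--     for num in arr:
--         if num not in bad:
--             ans.add(num)
--     return ans
-- ===== Notes on version B (the rewrite author's own statement) =====
-- stated objective: alternative
-- what changed: Replaces per-element hash lookups of num+1/num-1 with a sort of the distinct values followed by one scan of adjacent sorted pairs that marks every value participating in a consecutive (a, a+1) pair; the answer is the unmarked elements.
import Mathlib
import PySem

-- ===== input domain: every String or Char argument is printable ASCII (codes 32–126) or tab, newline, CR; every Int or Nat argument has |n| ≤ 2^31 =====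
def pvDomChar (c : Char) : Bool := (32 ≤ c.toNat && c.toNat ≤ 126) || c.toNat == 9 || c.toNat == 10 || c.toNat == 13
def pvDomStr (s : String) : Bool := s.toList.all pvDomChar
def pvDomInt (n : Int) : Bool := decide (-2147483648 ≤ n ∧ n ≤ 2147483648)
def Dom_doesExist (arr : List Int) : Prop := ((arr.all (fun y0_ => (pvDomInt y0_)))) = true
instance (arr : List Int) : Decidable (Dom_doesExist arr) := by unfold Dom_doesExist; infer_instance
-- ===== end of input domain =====

-- B replaces A's hash-membership tests of num±1 by a sort of the distinct values
-- and one scan over adjacent sorted pairs (alternative algorithm, same results).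

-- ===== PORT A =====
def doesExist (arr : List Int) : List Int :=
  let numsSet : PySem.Set Int := arr.foldl (fun s num => PySem.Set.add s num) PySem.Set.empty
  let ans : PySem.Set Int := arr.foldl (fun ans num =>
    if !(PySem.Set.contains numsSet (num + 1)) && !(PySem.Set.contains numsSet (num - 1)) then
      PySem.Set.add ans num
    else ans) PySem.Set.empty
  ans

-- ===== PORT B =====
def doesExist_alt (arr : List Int) : List Int :=
  let s : List Int := PySem.List.sorted (PySem.Set.ofList arr) (fun x => x) false
  let bad : PySem.Set Int := (s.zip (PySem.List.slice s (some 1) none)).foldl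
    (fun bd p => if p.2 == p.1 + 1 then PySem.Set.add (PySem.Set.add bd p.1) p.2 else bd)
    PySem.Set.empty
  arr.foldl (fun ans num =>
    if !(PySem.Set.contains bad num) then PySem.Set.add ans num else ans) PySem.Set.empty

-- ===== PRECONDITION & SPEC =====
def Spec_doesExist (arr : List Int) (out : List Int) : Prop := out = doesExist_alt arr
instance (arr : List Int) (out : List Int) : Decidable (Spec_doesExist arr out) := by unfold Spec_doesExist; infer_instance

-- ===== CLAIM (what is proved, stated in full; the proofs are below) =====
def Claim_equal_doesExist : Prop := ∀ (arr : List Int), Dom_doesExist arr → Spec_doesExist arr (doesExist arr)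

-- ===== LEMMAS AND PROOFS =====

-- In a strictly increasing Int list, v+1 is present iff (v, v+1) is an adjacent pair.
theorem pv_succ_mem_zip (s : List Int) : s.Pairwise (· < ·) → ∀ v : Int, v ∈ s → v + 1 ∈ s → (v, v + 1) ∈ s.zip s.tail := by
  induction s with
  | nil => intro _ v hv; simp at hv
  | cons x rest ih =>
    intro hs v hv hv1
    rcases List.pairwise_cons.mp hs with ⟨hx, hrest⟩
    cases rest with
    | nil => simp at hv hv1; omega
    | cons y t =>
      simp only [List.tail_cons, List.zip_cons_cons, List.mem_cons]
      by_cases hvx : v = x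
      · left
        have hy : x < y := hx y (by simp)
        have hvy : v + 1 = y := by
          rcases List.mem_cons.mp hv1 with h | h
          · omega
          rcases List.mem_cons.mp h with h | h
          · exact h
          · have := List.rel_of_pairwise_cons hrest h
            omega
        subst hvx; simp [hvy]
      · have hvr : v ∈ y :: t := by
          rcases List.mem_cons.mp hv with h | h
          · exact absurd h hvx
          · exact h
        have hv1r : v + 1 ∈ y :: t := by
          rcases List.mem_cons.mp hv1 with h | h
          · exfalso; have := hx v hvr; omega
          · exact h
        have := ih hrest v hvr hv1r
        right
        simpa using this

theorem pv_mem_bad_iff (l : List (Int × Int)) (s0 : PySem.Set Int) (v : Int) :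
    v ∈ l.foldl (fun bd p => if p.2 == p.1 + 1 then PySem.Set.add (PySem.Set.add bd p.1) p.2 else bd) s0 ↔
      v ∈ s0 ∨ ∃ p ∈ l, p.2 = p.1 + 1 ∧ (v = p.1 ∨ v = p.2) := by
  induction l generalizing s0 with
  | nil => simp
  | cons p l ih =>
    simp only [List.foldl_cons, List.mem_cons]
    rw [ih]
    by_cases h : p.2 = p.1 + 1
    · simp only [h, beq_self_eq_true, if_true, PySem.Set.mem_add, List.mem_cons]
      constructor
      · rintro (((hm | h1) | h2) | ⟨q, hq, hq2, hv⟩)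
        · exact Or.inl hm
        · exact Or.inr ⟨p, Or.inl rfl, h, Or.inl h1⟩
        · exact Or.inr ⟨p, Or.inl rfl, h, Or.inr (by rw [h]; exact h2)⟩
        · exact Or.inr ⟨q, Or.inr hq, hq2, hv⟩
      · rintro (hm | ⟨q, (rfl | hq), hq2, hv⟩)
        · exact Or.inl (Or.inl (Or.inl hm))
        · rcases hv with h1 | h2
          · exact Or.inl (Or.inl (Or.inr h1))
          · exact Or.inl (Or.inr (by rw [← h]; exact h2))
        · exact Or.inr ⟨q, hq, hq2, hv⟩
    · simp only [beq_iff_eq, h, if_false, List.mem_cons]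
      constructor
      · rintro (hm | ⟨q, hq, hq2, hv⟩)
        · exact Or.inl hm
        · exact Or.inr ⟨q, Or.inr hq, hq2, hv⟩
      · rintro (hm | ⟨q, (rfl | hq), hq2, hv⟩)
        · exact Or.inl hm
        · exact absurd hq2 h
        · exact Or.inr ⟨q, hq, hq2, hv⟩

-- ===== VERDICT (by name: the statement is the Claim_ definition above) =====
theorem doesExist_spec : Claim_equal_doesExist := by
  intro arr _
  unfold Spec_doesExist doesExist doesExist_alt
  set s := PySem.List.sorted (PySem.Set.ofList arr) (fun x => x) false with hsdef
  have hmem_s : ∀ x : Int, x ∈ s ↔ x ∈ arr := by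
    intro x
    rw [hsdef, PySem.List.mem_sorted, PySem.Set.mem_ofList]
  have hps : s.Pairwise (· < ·) := PySem.List.sorted_ofList_pairwise_lt arr
  have hslice : PySem.List.slice s (some 1) none = s.tail := PySem.List.slice_from_one s
  have hnums : arr.foldl (fun s num => PySem.Set.add s num) PySem.Set.empty = PySem.Set.ofList arr := rfl
  simp only [hnums, hslice]
  apply PySem.List.foldl_congr_mem
  intro acc num hnum
  have hbad : num ∈ (s.zip s.tail).foldl
      (fun bd p => if p.2 == p.1 + 1 then PySem.Set.add (PySem.Set.add bd p.1) p.2 else bd)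
      PySem.Set.empty ↔ (num + 1 ∈ arr ∨ num - 1 ∈ arr) := by
    rw [pv_mem_bad_iff]
    constructor
    · rintro (hm | ⟨q, hq, hq2, hv⟩)
      · simp [PySem.Set.empty] at hm
      · rcases List.of_mem_zip hq with ⟨h1, h2⟩
        rcases hv with rfl | rfl
        · exact Or.inl ((hmem_s _).mp (by rw [← hq2]; exact List.mem_of_mem_tail h2))
        · exact Or.inr (by rw [hq2]; simpa using (hmem_s _).mp h1)
    · rintro (h1 | h1)
      · exact Or.inr ⟨(num, num + 1),
          pv_succ_mem_zip s hps num ((hmem_s _).mpr hnum) ((hmem_s _).mpr h1), rfl, Or.inl rfl⟩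
      · refine Or.inr ⟨(num - 1, num), ?_, by ring, Or.inr rfl⟩
        have := pv_succ_mem_zip s hps (num - 1) ((hmem_s _).mpr h1)
          (by rw [sub_add_cancel]; exact (hmem_s _).mpr hnum)
        simpa using this
  have hA : (!(PySem.Set.contains (PySem.Set.ofList arr) (num + 1)) &&
      !(PySem.Set.contains (PySem.Set.ofList arr) (num - 1))) =
      !(PySem.Set.contains ((s.zip s.tail).foldl
        (fun bd p => if p.2 == p.1 + 1 then PySem.Set.add (PySem.Set.add bd p.1) p.2 else bd)
        PySem.Set.empty) num) := by
    have c1 : ∀ (t : PySem.Set Int) (x : Int), PySem.Set.contains t x = decide (x ∈ t) := by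
      intro t x
      rcases Bool.eq_false_or_eq_true (PySem.Set.contains t x) with ht | hf
      · simp [(PySem.Set.contains_iff t x).mp ht]
      · have hx : ¬ x ∈ t := by
          intro hm
          rw [(PySem.Set.contains_iff t x).mpr hm] at hf
          simp at hf
        simp [hx]
    simp only [c1, PySem.Set.mem_ofList]
    rw [Bool.eq_iff_iff]
    simp only [Bool.and_eq_true, Bool.not_eq_true', decide_eq_false_iff_not]
    rw [hbad]
    tauto
  rw [hA]
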